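-- pv_equiv track=rewrite | github.com/quarantin/imperial-probe-droid | twcog.py | is_same_squad
-- ===== SOURCE A (Python) =====
-- def is_same_squad(user_squad, ref_squad):
--
-- 	ref_leader = list(ref_squad)[0]
-- 	user_leader = list(user_squad)[0]
--
-- 	if ref_leader and ref_leader != user_leader:
-- 		return False
--
-- 	for ref_unit in ref_squad:
-- 		if ref_unit and ref_unit not in user_squad:
-- 			return False
--
-- 	return True
-- ===== SOURCE B (Python) =====
-- def is_same_squad(user_squad, ref_squad):
--
-- 	ref_leader = list(ref_squad)[0]
-- 	user_leader = list(user_squad)[0]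
--
-- 	if ref_leader and ref_leader != user_leader:
-- 		return False
--
-- 	# sort-then-merge subset test: sort both deduplicated sides and
-- 	# consume the sorted "need" list with one two-pointer scan.
-- 	need = sorted(set(u for u in ref_squad if u))
-- 	have = sorted(set(user_squad))
-- 	i = 0
-- 	for unit in have:
-- 		if i < len(need) and need[i] == unit:
-- 			i += 1
-- 	return i == len(need)
-- ===== Notes on version B (the rewrite author's own statement) =====
-- stated objective: alternative
-- what changed: A's early-returning membership scan (each ref unit searched in user_squad) is replaced by a sort-then-merge algorithm: both sides are deduplicated and sorted, and a single two-pointer merge over the sorted lists decides the subset condition.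
import Mathlib
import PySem

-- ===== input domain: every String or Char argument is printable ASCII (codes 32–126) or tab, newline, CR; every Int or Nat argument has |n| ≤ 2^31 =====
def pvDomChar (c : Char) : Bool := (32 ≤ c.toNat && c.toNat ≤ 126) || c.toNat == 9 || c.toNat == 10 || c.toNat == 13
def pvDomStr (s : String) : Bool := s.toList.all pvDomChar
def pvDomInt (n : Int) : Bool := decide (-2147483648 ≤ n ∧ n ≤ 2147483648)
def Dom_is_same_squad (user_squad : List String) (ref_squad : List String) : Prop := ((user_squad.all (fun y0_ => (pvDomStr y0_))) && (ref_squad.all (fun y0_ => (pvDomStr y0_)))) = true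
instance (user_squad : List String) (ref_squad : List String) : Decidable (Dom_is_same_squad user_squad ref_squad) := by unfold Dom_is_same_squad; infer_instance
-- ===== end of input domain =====

-- B replaces A's early-returning membership scan by a sort-then-merge subset test:
-- both deduplicated sides are sorted and a single two-pointer merge consumes the
-- sorted list of needed units; objective: alternative algorithm.
-- ===== PORT A =====
-- the for-loop of A: early return False on a truthy ref_unit missing from user_squad
def isSameSquadLoop (user_squad : List String) : List String → Bool
  | [] => true
  | r :: rs =>
      if r != "" && !(user_squad.contains r) then false
      else isSameSquadLoop user_squad rs

def is_same_squad (user_squad : List String) (ref_squad : List String) : Bool :=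
  match PySem.List.pyGet? ref_squad 0, PySem.List.pyGet? user_squad 0 with
  | some ref_leader, some user_leader =>
      if ref_leader != "" && ref_leader != user_leader then false
      else isSameSquadLoop user_squad ref_squad
  | _, _ => false   -- IndexError in Python; excluded by Pre_

-- ===== PORT B =====
-- the for-loop of B: two-pointer merge over the sorted 'have' list, advancing i
-- whenever the current unit matches need[i]
def mergeLoop (need : List String) : List String → Nat → Nat
  | [], i => i
  | unit :: hs, i =>
      if i < need.length ∧ need[i]? = some unit then mergeLoop need hs (i + 1)
      else mergeLoop need hs i

def is_same_squad_alt (user_squad : List String) (ref_squad : List String) : Bool :=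
  match PySem.List.pyGet? ref_squad 0 with
  | none => false   -- IndexError in Python; excluded by Pre_
  | some ref_leader =>
      match PySem.List.pyGet? user_squad 0 with
      | none => false   -- IndexError in Python; excluded by Pre_
      | some user_leader =>
          if ref_leader != "" && ref_leader != user_leader then false
          else
            let need := PySem.List.sorted (PySem.Set.ofList (ref_squad.filter (fun u => u != ""))) (fun x => x) false
            let haveL := PySem.List.sorted (PySem.Set.ofList user_squad) (fun x => x) false
            mergeLoop need haveL 0 == need.length

-- ===== PRECONDITION & SPEC =====
-- Pre_ excludes exactly the inputs where Python's list(...)[0] raises IndexError: an empty squad.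
def Pre_is_same_squad (user_squad : List String) (ref_squad : List String) : Prop :=
  user_squad ≠ [] ∧ ref_squad ≠ []
instance (user_squad : List String) (ref_squad : List String) : Decidable (Pre_is_same_squad user_squad ref_squad) := by unfold Pre_is_same_squad; infer_instance
def pvWitness_is_same_squad : List String × List String := (["a", "b"], ["a", "b"])

def Spec_is_same_squad (user_squad : List String) (ref_squad : List String) (out : Bool) : Prop := out = is_same_squad_alt user_squad ref_squad
instance (user_squad : List String) (ref_squad : List String) (out : Bool) : Decidable (Spec_is_same_squad user_squad ref_squad out) := by unfold Spec_is_same_squad; infer_instance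

-- ===== CLAIM (what is proved, stated in full; the proofs are below) =====
def Claim_equal_is_same_squad : Prop := ∀ (user_squad : List String) (ref_squad : List String), Dom_is_same_squad user_squad ref_squad → Pre_is_same_squad user_squad ref_squad → Spec_is_same_squad user_squad ref_squad (is_same_squad user_squad ref_squad)

-- ===== LEMMAS AND PROOFS =====

theorem loopA_iff (u : List String) (rs : List String) :
    isSameSquadLoop u rs = true ↔ ∀ x ∈ rs, x ≠ "" → x ∈ u := by
  induction rs with
  | nil => simp [isSameSquadLoop]
  | cons r rs ih =>
    simp only [isSameSquadLoop]
    by_cases hc : (r != "" && !(u.contains r)) = true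
    · rw [if_pos hc]
      rw [Bool.and_eq_true, bne_iff_ne, Bool.not_eq_true', ← Bool.not_eq_true,
        List.contains_iff_mem] at hc
      constructor
      · intro h; cases h
      · intro h; exact absurd (h r List.mem_cons_self hc.1) hc.2
    · rw [if_neg hc, ih]
      constructor
      · intro h x hx hxne
        rcases List.mem_cons.mp hx with rfl | hm
        · by_contra hcu
          exact hc (by simp [bne_iff_ne, hxne, hcu])
        · exact h x hm hxne
      · intro h x hx hxne
        exact h x (List.mem_cons_of_mem _ hx) hxne

-- two-pointer merge over strictly increasing lists decides subset of the remaining suffix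
theorem mergeLoop_iff (need : List String) (hv : List String) :
    ∀ i : Nat, i ≤ need.length → need.Pairwise (· < ·) → hv.Pairwise (· < ·) →
      (mergeLoop need hv i = need.length ↔ ∀ x ∈ need.drop i, x ∈ hv) := by
  induction hv with
  | nil =>
    intro i hi _ _
    simp only [mergeLoop, List.not_mem_nil]
    constructor
    · intro h; subst h; simp
    · intro h
      have : need.drop i = [] := List.eq_nil_iff_forall_not_mem.mpr (fun x hx => h x hx)
      have := List.drop_eq_nil_iff.mp this
      omega
  | cons h hs ih =>
    intro i hi hneed hhv
    have hhd : ∀ y ∈ hs, h < y := (List.pairwise_cons.mp hhv).1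
    have hhs : hs.Pairwise (· < ·) := (List.pairwise_cons.mp hhv).2
    simp only [mergeLoop]
    by_cases hc : i < need.length ∧ need[i]? = some h
    · rw [if_pos hc]
      obtain ⟨hlt, hget⟩ := hc
      have hgi : need[i] = h := by
        have := List.getElem?_eq_getElem hlt
        rw [this] at hget; exact Option.some_injective _ hget
      have hdrop : need.drop i = need[i] :: need.drop (i + 1) :=
        List.drop_eq_getElem_cons hlt
      have hrest : ∀ x ∈ need.drop (i + 1), need[i] < x := by
        have hp : (need.drop i).Pairwise (· < ·) := hneed.drop
        rw [hdrop] at hp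
        exact (List.pairwise_cons.mp hp).1
      rw [ih (i + 1) (by omega) hneed hhs]
      constructor
      · intro hsub x hx
        rw [hdrop] at hx
        rcases List.mem_cons.mp hx with rfl | hm
        · rw [hgi]; exact List.mem_cons_self
        · exact List.mem_cons_of_mem _ (hsub x hm)
      · intro hsub x hx
        have hx' : x ∈ need.drop i := by rw [hdrop]; exact List.mem_cons_of_mem _ hx
        rcases List.mem_cons.mp (hsub x hx') with rfl | hm
        · exact absurd (hgi ▸ hrest x hx) (lt_irrefl x)
        · exact hm
    · rw [if_neg hc]
      rw [ih i hi hneed hhs]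
      by_cases hlen : i < need.length
      · have hne : need[i] ≠ h := by
          intro he
          exact hc ⟨hlen, by rw [List.getElem?_eq_getElem hlen, he]⟩
        have hdrop : need.drop i = need[i] :: need.drop (i + 1) :=
          List.drop_eq_getElem_cons hlen
        have hrest : ∀ x ∈ need.drop i, need[i] ≤ x := by
          have hp : (need.drop i).Pairwise (· < ·) := hneed.drop
          rw [hdrop] at hp
          intro x hx
          rw [hdrop] at hx
          rcases List.mem_cons.mp hx with rfl | hm
          · exact le_refl _
          · exact le_of_lt ((List.pairwise_cons.mp hp).1 x hm)
        constructor
        · intro hsub x hx; exact List.mem_cons_of_mem _ (hsub x hx)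
        · intro hsub x hx
          have hmemi : need[i] ∈ need.drop i := by rw [hdrop]; exact List.mem_cons_self
          have hi_in : need[i] ∈ h :: hs := hsub _ hmemi
          have hi_hs : need[i] ∈ hs := by
            rcases List.mem_cons.mp hi_in with he | hm
            · exact absurd he hne
            · exact hm
          have hlt_i : h < need[i] := hhd _ hi_hs
          rcases List.mem_cons.mp (hsub x hx) with rfl | hm
          · exact absurd (lt_of_lt_of_le hlt_i (hrest x hx)) (lt_irrefl x)
          · exact hm
      · have : need.drop i = [] := List.drop_eq_nil_iff.mpr (by omega)
        rw [this]; simp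
-- the merge starting at 0, on the two sorted dedup lists, decides exactly A's loop condition
theorem altCore_iff (user_squad ref_squad : List String) :
    (mergeLoop (PySem.List.sorted (PySem.Set.ofList (ref_squad.filter (fun u => u != ""))) (fun x => x) false)
      (PySem.List.sorted (PySem.Set.ofList user_squad) (fun x => x) false) 0
      == (PySem.List.sorted (PySem.Set.ofList (ref_squad.filter (fun u => u != ""))) (fun x => x) false).length) = true
    ↔ ∀ x ∈ ref_squad, x ≠ "" → x ∈ user_squad := by
  rw [beq_iff_eq,
    mergeLoop_iff _ _ 0 (Nat.zero_le _)
      (PySem.List.sorted_ofList_pairwise_lt _)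
      (PySem.List.sorted_ofList_pairwise_lt _)]
  simp only [List.drop_zero, PySem.List.mem_sorted, PySem.Set.mem_ofList, List.mem_filter,
    bne_iff_ne, ne_eq]
  constructor
  · intro hsub x hx hne; exact hsub x ⟨hx, hne⟩
  · intro hsub x ⟨hx, hne⟩; exact hsub x hx hne

theorem core_eq (user_squad ref_squad : List String) :
    isSameSquadLoop user_squad ref_squad =
      (mergeLoop (PySem.List.sorted (PySem.Set.ofList (ref_squad.filter (fun u => u != ""))) (fun x => x) false)
        (PySem.List.sorted (PySem.Set.ofList user_squad) (fun x => x) false) 0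
        == (PySem.List.sorted (PySem.Set.ofList (ref_squad.filter (fun u => u != ""))) (fun x => x) false).length) := by
  rw [Bool.eq_iff_iff, loopA_iff, altCore_iff]

-- ===== VERDICT =====
theorem is_same_squad_spec : Claim_equal_is_same_squad := by
  intro user_squad ref_squad _ hpre
  unfold Spec_is_same_squad is_same_squad is_same_squad_alt
  cases user_squad with
  | nil => exact absurd rfl hpre.1
  | cons u us =>
    cases ref_squad with
    | nil => exact absurd rfl hpre.2
    | cons r rs =>
      simp only [PySem.List.pyGet?, PySem.List.pyIdx?]
      norm_num [core_eq]
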